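-- pv_equiv track=rewrite | github.com/tjfulle/learnpython | book/xmd.py | get_glossary
-- ===== SOURCE A (Python) =====
-- def get_glossary(lines):
--     wo_glossary, glossary = [], None
--     for line in lines.split('\n'):
--         if '## glossary' in ' '.join(line.split()).lower():
--             glossary = {}
--             continue
--         if '## exercise' in ' '.join(line.split()).lower():
--             break
--         if glossary is not None:
--             if not line.split():
--                 continue
--             if line.startswith('-'):
--                 key = line.replace(':**', '**')
--                 glossary[key] = []
--                 continue
--             glossary[key].append(line)
--         else:
--             wo_glossary.append(line)
--     glossary = glossary or {}
--     return '\n'.join(wo_glossary), glossary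
-- ===== SOURCE B (Python) =====
-- def get_glossary(lines):
--     def norm(l):
--         return ' '.join(l.split()).lower()
--
--     # pass 1: keep only the lines before the first exercise header
--     cut = []
--     for l in lines.split('\n'):
--         if '## exercise' in norm(l):
--             break
--         cut.append(l)
--
--     # pass 2: split around the glossary headers:
--     # 'pre' = lines before the first header, 'tail' = lines after the last header
--     pre, tail, seen = [], [], False
--     for l in cut:
--         if '## glossary' in norm(l):
--             seen, tail = True, []
--         else:
--             if not seen:
--                 pre.append(l)
--             tail.append(l)
--
--     if not seen:
--         return '\n'.join(pre), {}
--
--     # pass 3: parse the tail into the glossary dict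
--     glossary, key = {}, None
--     for l in tail:
--         if not l.split():
--             continue
--         if l.startswith('-'):
--             key = l.replace(':**', '**')
--             glossary[key] = []
--         else:
--             glossary[key].append(l)
--     return '\n'.join(pre), glossary
-- ===== Notes on version B (the rewrite author's own statement) =====
-- stated objective: alternative
-- what changed: A's single interleaved loop with break, dict-reset and mutable key state is replaced by three independent passes (cut at the first exercise header, split the cut around the glossary headers, parse only the final tail into the dict); Pre_ excludes inputs on which A raises (NameError/KeyError) and lines whose normalized form contains both header phrases at once, where A's glossary-first branch order versus B's stop-at-exercise are equally defensible readings of an ambiguous header.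
import Mathlib
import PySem

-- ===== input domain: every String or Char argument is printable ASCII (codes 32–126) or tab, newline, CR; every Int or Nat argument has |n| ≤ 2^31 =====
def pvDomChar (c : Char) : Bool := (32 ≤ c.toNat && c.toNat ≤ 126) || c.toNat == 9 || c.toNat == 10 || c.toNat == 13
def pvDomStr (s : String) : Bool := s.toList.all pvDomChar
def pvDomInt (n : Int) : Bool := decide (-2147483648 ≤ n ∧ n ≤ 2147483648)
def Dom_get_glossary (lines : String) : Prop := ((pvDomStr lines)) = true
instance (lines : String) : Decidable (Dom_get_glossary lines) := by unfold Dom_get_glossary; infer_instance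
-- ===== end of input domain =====

-- B replaces A's single stateful loop by three passes (cut at the first exercise header, split
-- around the glossary headers, parse the tail); equivalence is proved on Pre_.

-- ===== PORT A =====
-- shared one-line wrappers for the Python tests both sources repeat
def gloNorm (l : String) : String := PySem.Str.lower (PySem.Str.join " " (PySem.Str.split₀ l))
def gloIsG (l : String) : Bool := PySem.Str.isIn "## glossary" (gloNorm l)
def gloIsE (l : String) : Bool := PySem.Str.isIn "## exercise" (gloNorm l)
def gloBlank (l : String) : Bool := decide (PySem.Str.split₀ l = [])
def gloDash (l : String) : Bool := PySem.Str.startswith l "-"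

-- A's for-loop: wo accumulator, optional dict 'glossary', optional local 'key'
def aLoop : List String → List String → Option (PySem.Dict String (List String)) → Option String →
    List String × Option (PySem.Dict String (List String))
  | [], wo, g, _ => (wo, g)
  | l :: rest, wo, g, k =>
    if gloIsG l then aLoop rest wo (some PySem.Dict.empty) k
    else if gloIsE l then (wo, g)    -- break
    else match g with
      | some d =>
        if gloBlank l then aLoop rest wo (some d) k
        else if gloDash l then
          let key := PySem.Str.replace l ":**" "**"
          aLoop rest wo (some (d.insert key [])) (some key)
        else match k with
          | some key => match d.get? key with
            | some v => aLoop rest wo (some (d.insert key (v ++ [l]))) (some key)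
            | none => aLoop rest wo (some d) (some key)   -- Python raises KeyError: outside Pre_
          | none => aLoop rest wo (some d) none           -- Python raises NameError: outside Pre_
      | none => aLoop rest (wo ++ [l]) none k

def get_glossary (lines : String) : String × (List (String × List String)) :=
  let r := aLoop ((PySem.Str.split? lines "\n").getD []) [] none none
  (PySem.Str.join "\n" r.1,
   (match r.2 with
    | none => (PySem.Dict.empty : PySem.Dict String (List String))
    | some d => if d.items = [] then PySem.Dict.empty else d).items)   -- 'glossary or {}'

-- ===== PORT B =====
-- pass 1: the lines before the first exercise header
def bCut : List String → List String
  | [] => []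
  | l :: rest => if gloIsE l then [] else l :: bCut rest

-- pass 2 step: (pre, tail, seen); a glossary header restarts the tail
def bStep (s : List String × List String × Bool) (l : String) :
    List String × List String × Bool :=
  if gloIsG l then (s.1, [], true)
  else ((if s.2.2 then s.1 else s.1 ++ [l]), s.2.1 ++ [l], s.2.2)

-- pass 3: parse the tail into the dict
def bParse : List String → PySem.Dict String (List String) → Option String →
    PySem.Dict String (List String)
  | [], d, _ => d
  | l :: rest, d, k =>
    if gloBlank l then bParse rest d k
    else if gloDash l then
      let key := PySem.Str.replace l ":**" "**"
      bParse rest (d.insert key []) (some key)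
    else match k with
      | some key => match d.get? key with
        | some v => bParse rest (d.insert key (v ++ [l])) (some key)
        | none => bParse rest d (some key)   -- Python raises KeyError: outside Pre_
      | none => bParse rest d none           -- Python raises KeyError (key None): outside Pre_

def get_glossary_alt (lines : String) : String × (List (String × List String)) :=
  let c := bCut ((PySem.Str.split? lines "\n").getD [])
  let s := c.foldl bStep ([], [], false)
  if s.2.2 then (PySem.Str.join "\n" s.1, (bParse s.2.1 PySem.Dict.empty none).items)
  else (PySem.Str.join "\n" s.1, [])

-- ===== PRECONDITION & SPEC =====
-- Pre_ excludes (a) inputs with a line whose whitespace-normalized lowercase form contains BOTH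
-- '## glossary' and '## exercise': A reads such an ambiguous line as a glossary header, B as the
-- end of the pre-exercise region, and neither reading is specified; and (b) inputs on which A
-- raises (NameError/KeyError): those where, among the lines before the first exercise header,
-- some non-blank non-dash line follows a glossary header with no dash-led key line strictly
-- after the latest glossary header before it.
def Pre_get_glossary (lines : String) : Prop :=
  (∀ x ∈ (PySem.Str.split? lines "\n").getD [], (gloIsG x && gloIsE x) = false) ∧
  (let c := ((PySem.Str.split? lines "\n").getD []).takeWhile (fun l => !gloIsE l)
   ∀ i < c.length,
     (!gloIsG (c.getD i "") && !gloBlank (c.getD i "") && !gloDash (c.getD i "")) = true →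
     (∃ j < i, gloIsG (c.getD j "") = true) →
     ∃ j < i, (!gloIsG (c.getD j "") && !gloBlank (c.getD j "") && gloDash (c.getD j "")) = true ∧
       ∀ m < i, j ≤ m → gloIsG (c.getD m "") = false)
instance (lines : String) : Decidable (Pre_get_glossary lines) := by
  unfold Pre_get_glossary; infer_instance

def pvWitness_get_glossary : String := "intro\n## Glossary\n- **term:** short\nmore detail\n## Exercises\nx"

def Spec_get_glossary (lines : String) (out : String × (List (String × List String))) : Prop := out = get_glossary_alt lines
instance (lines : String) (out : String × (List (String × List String))) : Decidable (Spec_get_glossary lines out) := by unfold Spec_get_glossary; infer_instance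

-- ===== CLAIM (what is proved, stated in full; the proofs are below) =====
def Claim_equal_get_glossary : Prop := ∀ (lines : String), Dom_get_glossary lines → Pre_get_glossary lines → Spec_get_glossary lines (get_glossary lines)

-- ===== LEMMAS AND PROOFS =====

-- proof-side vocabulary
def keyline (l : String) : Bool := !gloIsG l && !gloBlank l && gloDash l
def contline (l : String) : Bool := !gloIsG l && !gloBlank l && !gloDash l

def PreL (c : List String) : Prop :=
  ∀ i < c.length, contline (c.getD i "") = true →
    (∃ j < i, gloIsG (c.getD j "") = true) →
    ∃ j < i, keyline (c.getD j "") = true ∧ ∀ m < i, j ≤ m → gloIsG (c.getD m "") = false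

-- the suffix after the LAST glossary header, if any
def lastTail : List String → Option (List String)
  | [] => none
  | l :: rest => match lastTail rest with
    | some t => some t
    | none => if gloIsG l then some rest else none

def SHypOk (ok : Bool) (i : Nat) (c : List String) : Prop :=
  (∃ j < i, keyline (c.getD j "") = true ∧ ∀ m < i, j ≤ m → gloIsG (c.getD m "") = false) ∨
  ((∀ j < i, gloIsG (c.getD j "") = false) ∧ ok = true)

def safeG : List String → Bool → Prop
  | [], _ => True
  | l :: rest, ok =>
    (gloIsG l = true → safeG rest false) ∧
    (gloIsG l = false → gloIsE l = false →
      (gloBlank l = true → safeG rest ok) ∧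
      (gloBlank l = false → gloDash l = true → safeG rest true) ∧
      (gloBlank l = false → gloDash l = false → ok = true ∧ safeG rest ok))

def SHyp (c : List String) (ok : Bool) : Prop :=
  ∀ i < c.length, contline (c.getD i "") = true → SHypOk ok i c

theorem shift_SHypOk (l : String) (rest : List String) (ok ok' : Nat → Bool)
    (i : Nat) (h : SHypOk (ok (i+1)) (i + 1) (l :: rest))
    (hok : ∀ i, ok (i+1) = true → ok' i = true)
    (hkl : keyline l = false) : SHypOk (ok' i) i rest := by
  rcases h with ⟨j, hj, hkey, hnoG⟩ | ⟨hall, hokk⟩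
  · cases j with
    | zero =>
      exfalso
      simp only [List.getD_cons_zero] at hkey
      rw [hkl] at hkey; cases hkey
    | succ j =>
      refine Or.inl ⟨j, by omega, by simpa using hkey, ?_⟩
      intro m hm hjm
      have := hnoG (m + 1) (by omega) (by omega)
      simpa using this
  · refine Or.inr ⟨?_, hok i hokk⟩
    intro j hj
    have := hall (j + 1) (by omega)
    simpa using this

theorem safeG_of_SHyp (c : List String) : ∀ (ok : Bool), SHyp c ok → safeG c ok := by
  induction c with
  | nil => intro ok _; trivial
  | cons l rest ih =>
    intro ok h
    have hstep : ∀ i, i < rest.length → i + 1 < (l :: rest).length := by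
      intro i hi; simpa using Nat.succ_lt_succ hi
    have hshift : ∀ i, i < rest.length → contline (rest.getD i "") = true →
        SHypOk ok (i+1) (l :: rest) := by
      intro i hi hc
      exact h (i + 1) (hstep i hi) (by simpa using hc)
    refine ⟨?_, ?_⟩
    · -- glossary header: dict reset, key unusable
      intro hg
      apply ih false
      intro i hi hc
      rcases hshift i hi hc with ⟨j, hj, hkey, hnoG⟩ | ⟨hall, _⟩
      · cases j with
        | zero =>
          exfalso
          simp only [List.getD_cons_zero, keyline, hg] at hkey
          simp at hkey
        | succ j =>
          refine Or.inl ⟨j, by omega, by simpa using hkey, ?_⟩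
          intro m hm hjm
          have := hnoG (m + 1) (by omega) (by omega)
          simpa using this
      · exact absurd (hall 0 (Nat.succ_pos i)) (by simp [hg])
    · intro hg he
      refine ⟨?_, ?_, ?_⟩
      · -- blank line
        intro hb
        apply ih ok
        intro i hi hc
        exact shift_SHypOk l rest (fun _ => ok) (fun _ => ok) i (hshift i hi hc)
          (fun _ hh => hh) (by simp [keyline, hb])
      · -- dash line: key becomes usable
        intro hb hd
        apply ih true
        intro i hi hc
        rcases hshift i hi hc with ⟨j, hj, hkey, hnoG⟩ | ⟨hall, _⟩
        · cases j with
          | zero =>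
            refine Or.inr ⟨?_, rfl⟩
            intro j' hj'
            have := hnoG (j' + 1) (by omega) (by omega)
            simpa using this
          | succ j =>
            refine Or.inl ⟨j, by omega, by simpa using hkey, ?_⟩
            intro m hm hjm
            have := hnoG (m + 1) (by omega) (by omega)
            simpa using this
        · refine Or.inr ⟨?_, rfl⟩
          intro j hj
          have := hall (j + 1) (by omega)
          simpa using this
      · -- content line: needs a usable key
        intro hb hd
        have hcl : contline l = true := by simp [contline, hg, hb, hd]
        rcases h 0 (Nat.succ_pos _) (by simpa using hcl) with ⟨j, hj, _⟩ | ⟨_, hok⟩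
        · omega
        · refine ⟨hok, ?_⟩
          subst hok
          apply ih true
          intro i hi hc
          rcases hshift i hi hc with hl1 | ⟨hall, _⟩
          · exact shift_SHypOk l rest (fun _ => true) (fun _ => true) i (Or.inl hl1)
              (fun _ hh => hh) (by simp [keyline, hd])
          · exact shift_SHypOk l rest (fun _ => true) (fun _ => true) i (Or.inr ⟨hall, rfl⟩)
              (fun _ hh => hh) (by simp [keyline, hd])

theorem bParse_key_irrel (c : List String) :
    ∀ (d : PySem.Dict String (List String)) (k k' : Option String),
    (∀ x ∈ c, gloIsG x = false) →
    (∀ x ∈ c, gloIsE x = false) →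
    safeG c false →
    bParse c d k = bParse c d k' := by
  induction c with
  | nil => intro d k k' _ _ _; rfl
  | cons l rest ih =>
    intro d k k' hg he hs
    have hgl : gloIsG l = false := hg l (by simp)
    have hel : gloIsE l = false := he l (by simp)
    have hs2 := hs.2 hgl hel
    by_cases hb : gloBlank l = true
    · simp only [bParse, hb, if_true]
      exact ih d k k' (fun x hx => hg x (by simp [hx])) (fun x hx => he x (by simp [hx]))
        (hs2.1 hb)
    · have hb' : gloBlank l = false := by simpa using hb
      by_cases hd : gloDash l = true
      · simp [bParse, hb', hd]
      · have hd' : gloDash l = false := by simpa using hd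
        exact absurd (hs2.2.2 hb' hd').1 (by simp)

theorem SHyp_of_PreL (l : String) (rest : List String)
    (hl : gloIsG l = true) (h : PreL (l :: rest)) : SHyp rest false := by
  intro i hi hc
  have hh := h (i + 1) (by simpa using Nat.succ_lt_succ hi) (by simpa using hc)
    ⟨0, Nat.succ_pos i, by simpa using hl⟩
  rcases hh with ⟨j, hj, hkey, hnoG⟩
  cases j with
  | zero =>
    exfalso
    simp only [List.getD_cons_zero, keyline, hl] at hkey
    simp at hkey
  | succ j =>
    refine Or.inl ⟨j, by omega, by simpa using hkey, ?_⟩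
    intro m hm hjm
    have := hnoG (m + 1) (by omega) (by omega)
    simpa using this

theorem PreL_cons (l : String) (rest : List String)
    (_hl : gloIsG l = false) (h : PreL (l :: rest)) : PreL rest := by
  intro i hi hc ⟨j, hj, hGj⟩
  have hh := h (i + 1) (by simpa using Nat.succ_lt_succ hi) (by simpa using hc)
    ⟨j + 1, by omega, by simpa using hGj⟩
  rcases hh with ⟨j0, hj0, hkey, hnoG⟩
  cases j0 with
  | zero =>
    exfalso
    have := hnoG (j + 1) (by omega) (by omega)
    rw [List.getD_cons_succ] at this
    rw [this] at hGj; cases hGj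
  | succ j0 =>
    refine ⟨j0, by omega, by simpa using hkey, ?_⟩
    intro m hm hjm
    have := hnoG (m + 1) (by omega) (by omega)
    simpa using this

theorem bCut_eq_takeWhile (c : List String) :
    bCut c = c.takeWhile (fun l => !gloIsE l) := by
  induction c with
  | nil => rfl
  | cons l rest ih =>
    by_cases h : gloIsE l = true
    · simp [bCut, List.takeWhile, h]
    · simp only [Bool.not_eq_true] at h
      simp [bCut, List.takeWhile, h, ih]

theorem aLoop_cut (c : List String) (wo : List String)
    (g : Option (PySem.Dict String (List String))) (k : Option String)
    (hGE : ∀ x ∈ c, (gloIsG x && gloIsE x) = false) :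
    aLoop c wo g k = aLoop (bCut c) wo g k := by
  induction c generalizing wo g k with
  | nil => rfl
  | cons l rest ih =>
    have hGErest : ∀ x ∈ rest, (gloIsG x && gloIsE x) = false :=
      fun x hx => hGE x (by simp [hx])
    by_cases hE : gloIsE l = true
    · have hg : gloIsG l = false := by
        have := hGE l (by simp); revert this; rw [hE]; cases hgg : gloIsG l <;> simp
      rw [show bCut (l :: rest) = [] from by simp [bCut, hE]]
      cases g <;> simp [aLoop, hg, hE]
    · have hE' : gloIsE l = false := by simpa using hE
      rw [show bCut (l :: rest) = l :: bCut rest from by simp [bCut, hE']]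
      cases g with
      | none =>
        simp only [aLoop]
        split_ifs <;> first | rfl | exact ih _ _ _ hGErest
      | some d =>
        simp only [aLoop]
        split_ifs <;> try (first | rfl | exact ih _ _ _ hGErest)
        cases k with
        | none => exact ih _ _ _ hGErest
        | some key => cases hd : d.get? key <;> simp only [hd] <;> exact ih _ _ _ hGErest

theorem lastTail_eq_none_iff (c : List String) :
    lastTail c = none ↔ ∀ x ∈ c, gloIsG x = false := by
  induction c with
  | nil => simp [lastTail]
  | cons l rest ih =>
    simp only [lastTail]
    cases hlt : lastTail rest with
    | some t =>
      show some t = none ↔ ∀ x ∈ l :: rest, gloIsG x = false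
      have hne : ¬ (∀ x ∈ rest, gloIsG x = false) := fun hall => by
        rw [ih.mpr hall] at hlt; cases hlt
      constructor
      · intro h; cases h
      · intro hall
        exact absurd (fun x hx => hall x (List.mem_cons_of_mem _ hx)) hne
    | none =>
      by_cases hg : gloIsG l = true
      · simp [hg]
      · simp only [Bool.not_eq_true] at hg
        simp [hg]
        exact fun a ha => (ih.mp hlt) a ha

theorem foldl_bStep (c : List String) (pre tail : List String) (seen : Bool) :
    c.foldl bStep (pre, tail, seen) =
      (lastTail c).elim ((if seen then pre else pre ++ c), tail ++ c, seen)
        (fun t => ((if seen then pre else pre ++ c.takeWhile (fun l => !gloIsG l)), t, true)) := by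
  induction c generalizing pre tail seen with
  | nil => cases seen <;> simp [lastTail]
  | cons l rest ih =>
    rw [List.foldl_cons]
    by_cases hg : gloIsG l = true
    · rw [show bStep (pre, tail, seen) l = (pre, [], true) by simp [bStep, hg]]
      rw [ih]
      simp only [lastTail]
      cases hlt : lastTail rest with
      | some t => cases seen <;> simp [hg]
      | none => cases seen <;> simp [hg]
    · simp only [Bool.not_eq_true] at hg
      rw [show bStep (pre, tail, seen) l =
            ((if seen then pre else pre ++ [l]), tail ++ [l], seen) by simp [bStep, hg]]
      rw [ih]
      simp only [lastTail]
      cases hlt : lastTail rest with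
      | some t => cases seen <;> simp [hg]
      | none => cases seen <;> simp [hg]

theorem aLoop_gphase (c : List String) :
    ∀ (wo : List String) (d : PySem.Dict String (List String)) (k : Option String) (ok : Bool),
    (∀ x ∈ c, gloIsE x = false) →
    safeG c ok →
    (ok = true → ∃ key v, k = some key ∧ d.get? key = some v) →
    aLoop c wo (some d) k =
      (wo, some ((lastTail c).elim (bParse c d k)
        (fun t => bParse t PySem.Dict.empty none))) := by
  induction c with
  | nil => intro wo d k ok _ _ _; rfl
  | cons l rest ih =>
    intro wo d k ok he hs hk
    have herest : ∀ x ∈ rest, gloIsE x = false := fun x hx => he x (by simp [hx])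
    by_cases hg : gloIsG l = true
    · have hrec : safeG rest false := hs.1 hg
      rw [show aLoop (l :: rest) wo (some d) k = aLoop rest wo (some PySem.Dict.empty) k from by
        simp [aLoop, hg]]
      rw [ih wo PySem.Dict.empty k false herest hrec (by simp)]
      cases hlt : lastTail rest with
      | some t => simp [lastTail, hlt]
      | none =>
        have hnoG : ∀ x ∈ rest, gloIsG x = false := (lastTail_eq_none_iff rest).mp hlt
        rw [bParse_key_irrel rest PySem.Dict.empty k none hnoG herest hrec]
        simp [lastTail, hlt, hg]
    · have hg' : gloIsG l = false := by simpa using hg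
      have he' : gloIsE l = false := he l (by simp)
      have hsr := hs.2 hg' he'
      by_cases hb : gloBlank l = true
      · rw [show aLoop (l :: rest) wo (some d) k = aLoop rest wo (some d) k from by
          simp [aLoop, hg', he', hb]]
        rw [ih wo d k ok herest (hsr.1 hb) hk]
        cases hlt : lastTail rest with
        | some t => simp [lastTail, hlt]
        | none => simp [lastTail, hlt, hg', bParse, hb]
      · have hb' : gloBlank l = false := by simpa using hb
        by_cases hd : gloDash l = true
        · rw [show aLoop (l :: rest) wo (some d) k =
              aLoop rest wo (some (d.insert (PySem.Str.replace l ":**" "**") []))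
                (some (PySem.Str.replace l ":**" "**")) from by
            simp [aLoop, hg', he', hb', hd]]
          rw [ih wo _ _ true herest (hsr.2.1 hb' hd)
            (fun _ => ⟨PySem.Str.replace l ":**" "**", [], rfl, PySem.Dict.get?_insert_self _ _ _⟩)]
          cases hlt : lastTail rest with
          | some t => simp [lastTail, hlt]
          | none => simp [lastTail, hlt, hg', bParse, hb', hd]
        · have hd' : gloDash l = false := by simpa using hd
          have hok : ok = true := (hsr.2.2 hb' hd').1
          obtain ⟨key, v, hkk, hgv⟩ := hk hok
          subst hkk
          rw [show aLoop (l :: rest) wo (some d) (some key) =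
              aLoop rest wo (some (d.insert key (v ++ [l]))) (some key) from by
            simp [aLoop, hg', he', hb', hd', hgv]]
          rw [ih wo _ _ true herest (hok ▸ (hsr.2.2 hb' hd').2)
            (fun _ => ⟨key, v ++ [l], rfl, PySem.Dict.get?_insert_self _ _ _⟩)]
          cases hlt : lastTail rest with
          | some t => simp [lastTail, hlt]
          | none => simp [lastTail, hlt, hg', bParse, hb', hd', hgv]

theorem aLoop_nphase (c : List String) :
    ∀ (wo : List String),
    (∀ x ∈ c, gloIsE x = false) →
    PreL c →
    aLoop c wo none none =
      (lastTail c).elim (wo ++ c, none)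
        (fun t => (wo ++ c.takeWhile (fun l => !gloIsG l),
                   some (bParse t PySem.Dict.empty none))) := by
  induction c with
  | nil => intro wo _ _; simp [aLoop, lastTail]
  | cons l rest ih =>
    intro wo he hp
    have herest : ∀ x ∈ rest, gloIsE x = false := fun x hx => he x (by simp [hx])
    by_cases hg : gloIsG l = true
    · rw [show aLoop (l :: rest) wo none none = aLoop rest wo (some PySem.Dict.empty) none from by
        simp [aLoop, hg]]
      have hsafe : safeG rest false := safeG_of_SHyp rest false (SHyp_of_PreL l rest hg hp)
      rw [aLoop_gphase rest wo PySem.Dict.empty none false herest hsafe (by simp)]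
      cases hlt : lastTail rest with
      | some t => simp [lastTail, hlt, hg]
      | none => simp [lastTail, hlt, hg]
    · have hg' : gloIsG l = false := by simpa using hg
      have he' : gloIsE l = false := he l (by simp)
      rw [show aLoop (l :: rest) wo none none = aLoop rest (wo ++ [l]) none none from by
        simp [aLoop, hg', he']]
      rw [ih (wo ++ [l]) herest (PreL_cons l rest hg' hp)]
      cases hlt : lastTail rest with
      | some t => simp [lastTail, hlt, hg']
      | none => simp [lastTail, hlt, hg']

theorem finalize_items (d : PySem.Dict String (List String)) :
    (if d.items = [] then (PySem.Dict.empty : PySem.Dict String (List String)) else d).items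
      = d.items := by
  by_cases h : d.items = [] <;> simp [h, PySem.Dict.empty]

theorem bCut_noE (c : List String) : ∀ x ∈ bCut c, gloIsE x = false := by
  induction c with
  | nil => intro x hx; cases hx
  | cons l rest ih =>
    intro x hx
    by_cases hE : gloIsE l = true
    · rw [show bCut (l :: rest) = [] from by simp [bCut, hE]] at hx; cases hx
    · have hE' : gloIsE l = false := by simpa using hE
      rw [show bCut (l :: rest) = l :: bCut rest from by simp [bCut, hE']] at hx
      rcases List.mem_cons.mp hx with rfl | hx
      · exact hE'
      · exact ih x hx

-- ===== VERDICT (by name: the statement is the Claim_ definition above) =====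
theorem get_glossary_spec : Claim_equal_get_glossary := by
  intro lines _ hpre
  obtain ⟨hGE, hpre⟩ := hpre
  unfold Spec_get_glossary
  simp only [get_glossary, get_glossary_alt]
  have hp0 : PreL (((PySem.Str.split? lines "\n").getD []).takeWhile (fun l => !gloIsE l)) := hpre
  rw [← bCut_eq_takeWhile] at hp0
  rw [aLoop_cut ((PySem.Str.split? lines "\n").getD []) [] none none hGE]
  rw [aLoop_nphase (bCut ((PySem.Str.split? lines "\n").getD [])) []
    (bCut_noE ((PySem.Str.split? lines "\n").getD [])) hp0]
  rw [foldl_bStep (bCut ((PySem.Str.split? lines "\n").getD [])) [] [] false]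
  cases hlt : lastTail (bCut ((PySem.Str.split? lines "\n").getD [])) with
  | none => simp [PySem.Dict.empty]
  | some t => simp [finalize_items]
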